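-- pv_equiv track=rewrite | github.com/Rejean-McCormick/SemantiK_Architect | morphology/celtic.py | _apply_suffix_rules
-- ===== SOURCE A (Python) =====
-- from typing import Dict, Any, Optional
--
-- def _apply_suffix_rules(word: str, rules: Any) -> str:
--     """
--     Apply the first matching suffix replacement rule to `word`.
--
--     Rules are expected to be a list of dicts:
--       [{ "ends_with": "...", "replace_with": "..." }, ...]
--     """
--     if not isinstance(rules, list):
--         return word
--
--     # Match longer endings first
--     sorted_rules = sorted(
--         rules,
--         key=lambda r: len(r.get("ends_with", "")),
--         reverse=True,
--     )
--
--     for rule in sorted_rules: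
--         end = rule.get("ends_with", "")
--         repl = rule.get("replace_with", "")
--         if end and word.endswith(end):
--             stem = word[:-len(end)]
--             return stem + repl
--
--     return word
-- ===== SOURCE B (Python) =====
-- def _apply_suffix_rules(word, rules):
--     """Single pass: track the longest matching suffix rule (ties -> earliest rule)."""
--     if not isinstance(rules, list):
--         return word
--
--     best = None  # (suffix_length, replacement)
--     for rule in rules:
--         end = rule.get("ends_with", "")
--         if end and word.endswith(end):
--             n = len(end)
--             if best is None or n > best[0]:
--                 best = (n, rule.get("replace_with", ""))
--
--     if best is None:
--         return word
--     n, repl = best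
--     return word[:-n] + repl
-- ===== Notes on version B (the rewrite author's own statement) =====
-- stated objective: alternative
-- what changed: Replaced A's sort-all-rules-then-scan-for-first-match with a single unsorted pass that tracks the longest matching suffix rule (strict improvement keeps the earliest rule on ties).
import Mathlib
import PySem

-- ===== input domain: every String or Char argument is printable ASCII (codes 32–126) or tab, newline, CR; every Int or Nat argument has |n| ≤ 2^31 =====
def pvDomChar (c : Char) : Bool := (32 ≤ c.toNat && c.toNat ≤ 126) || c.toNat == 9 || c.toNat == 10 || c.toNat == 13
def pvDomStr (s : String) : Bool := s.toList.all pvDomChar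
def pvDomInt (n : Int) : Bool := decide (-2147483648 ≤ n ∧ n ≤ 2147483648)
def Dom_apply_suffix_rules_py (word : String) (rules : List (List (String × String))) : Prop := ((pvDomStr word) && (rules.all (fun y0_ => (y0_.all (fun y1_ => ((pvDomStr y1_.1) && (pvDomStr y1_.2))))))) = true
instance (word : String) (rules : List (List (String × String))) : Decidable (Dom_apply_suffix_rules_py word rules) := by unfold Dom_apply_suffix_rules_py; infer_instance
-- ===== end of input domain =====

-- B replaces A's sort-then-scan by a single unsorted pass tracking the longest matching suffix rule (ties: earliest rule); same return value.


-- ===== PORT A =====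
-- A's scan over the sorted rules, with Python's early return as structural recursion
def pvAloop (word : String) : List (List (String × String)) → String
  | [] => word
  | rule :: rest =>
    let end_ := (PySem.Dict.mk rule).getD "ends_with" ""
    let repl := (PySem.Dict.mk rule).getD "replace_with" ""
    if (end_ != "") && PySem.Str.endswith word end_ then
      PySem.Str.slice word none (some (-(PySem.Str.len end_))) ++ repl
    else pvAloop word rest

def apply_suffix_rules_py (word : String) (rules : List (List (String × String))) : String :=
  let sorted_rules := PySem.List.sorted rules
    (fun r => PySem.Str.len ((PySem.Dict.mk r).getD "ends_with" "")) true
  pvAloop word sorted_rules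

-- ===== PORT B =====
-- B's single-pass accumulator: best = (suffix_length, replacement) of the longest match so far
def pvBstep (word : String) (best : Option (Int × String)) (rule : List (String × String)) : Option (Int × String) :=
  let end_ := (PySem.Dict.mk rule).getD "ends_with" ""
  if (end_ != "") && PySem.Str.endswith word end_ then
    let n := PySem.Str.len end_
    match best with
    | none => some (n, (PySem.Dict.mk rule).getD "replace_with" "")
    | some b => if b.1 < n then some (n, (PySem.Dict.mk rule).getD "replace_with" "") else best
  else best

def apply_suffix_rules_py_alt (word : String) (rules : List (List (String × String))) : String :=
  match rules.foldl (pvBstep word) none with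
  | none => word
  | some (n, repl) => PySem.Str.slice word none (some (-n)) ++ repl

-- ===== PRECONDITION & SPEC =====
def Spec_apply_suffix_rules_py (word : String) (rules : List (List (String × String))) (out : String) : Prop := out = apply_suffix_rules_py_alt word rules
instance (word : String) (rules : List (List (String × String))) (out : String) : Decidable (Spec_apply_suffix_rules_py word rules out) := by unfold Spec_apply_suffix_rules_py; infer_instance

-- ===== CLAIM (what is proved, stated in full; the proofs are below) =====
def Claim_equal_apply_suffix_rules_py : Prop := ∀ (word : String) (rules : List (List (String × String))), Dom_apply_suffix_rules_py word rules → Spec_apply_suffix_rules_py word rules (apply_suffix_rules_py word rules)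

-- ===== LEMMAS AND PROOFS =====

-- proof-side abbreviations for the shared rule projections
def pvKey (r : List (String × String)) : Int :=
  PySem.Str.len ((PySem.Dict.mk r).getD "ends_with" "")

def pvP (word : String) (r : List (String × String)) : Bool :=
  ((PySem.Dict.mk r).getD "ends_with" "" != "") &&
    PySem.Str.endswith word ((PySem.Dict.mk r).getD "ends_with" "")

def pvG (r : List (String × String)) : Int × String :=
  (pvKey r, (PySem.Dict.mk r).getD "replace_with" "")

-- B's step expressed on whole rules instead of (length, replacement) pairs
def pvStepR (word : String) (acc : Option (List (String × String))) (x : List (String × String)) : Option (List (String × String)) :=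
  if pvP word x then
    match acc with
    | none => some x
    | some m => if pvKey m < pvKey x then some x else acc
  else acc

lemma pvAloop_eq_find (word : String) (l : List (List (String × String))) :
    pvAloop word l =
      match l.find? (pvP word) with
      | none => word
      | some r => PySem.Str.slice word none (some (-(pvKey r))) ++ (PySem.Dict.mk r).getD "replace_with" "" := by
  induction l with
  | nil => rfl
  | cons r rest ih =>
    by_cases h : pvP word r = true
    · simp only [pvAloop, List.find?, pvP] at *
      rw [h]
      simp [pvKey, h]
    · simp only [pvAloop, List.find?, pvP] at *
      rw [Bool.not_eq_true] at h
      rw [h]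
      simpa using ih

lemma pvBstep_eq_stepR (word : String) (acc : Option (List (String × String))) (x : List (String × String)) :
    pvBstep word (acc.map pvG) x = (pvStepR word acc x).map pvG := by
  cases acc with
  | none =>
    by_cases h : pvP word x = true
    · simp only [pvBstep, pvStepR, pvP] at *; rw [h]; simp [h, pvG, pvKey]
    · rw [Bool.not_eq_true] at h
      simp only [pvBstep, pvStepR, pvP] at *; rw [h]; simp [h]
  | some m =>
    by_cases h : pvP word x = true
    · simp only [pvBstep, pvStepR, pvP] at *
      rw [h]
      split_ifs <;> simp [pvG, pvKey] <;>
        (intro hle; exfalso; simp [pvKey, pysem] at *; omega)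
    · rw [Bool.not_eq_true] at h
      simp only [pvBstep, pvStepR, pvP] at *; rw [h]; simp [h]

lemma pvFoldB_eq_foldR (word : String) (xs : List (List (String × String))) :
    ∀ acc : Option (List (String × String)),
      xs.foldl (pvBstep word) (acc.map pvG) = (xs.foldl (pvStepR word) acc).map pvG := by
  induction xs with
  | nil => intro acc; rfl
  | cons x xs ih =>
    intro acc
    simp only [List.foldl_cons]
    rw [pvBstep_eq_stepR, ih]

-- inserting into a descending-sorted list commutes with taking the first match, as B's strict-improvement step
lemma pvInsert_find (word : String) (x : List (String × String)) :
    ∀ l : List (List (String × String)),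
      l.Pairwise (fun a b => pvKey b ≤ pvKey a) →
      (PySem.List.insertBy (fun a b => decide (pvKey b < pvKey a)) x l).find? (pvP word) =
        pvStepR word (l.find? (pvP word)) x := by
  intro l
  induction l with
  | nil =>
    intro _
    by_cases h : pvP word x = true
    · simp [PySem.List.insertBy, List.find?, pvStepR, h]
    · rw [Bool.not_eq_true] at h
      simp [PySem.List.insertBy, List.find?, pvStepR, h]
  | cons y ys ih =>
    intro hpw
    have hy : ∀ b ∈ ys, pvKey b ≤ pvKey y := (List.pairwise_cons.mp hpw).1
    have hys : ys.Pairwise (fun a b => pvKey b ≤ pvKey a) := (List.pairwise_cons.mp hpw).2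
    by_cases hxy : pvKey y < pvKey x
    · -- x goes in front
      have : PySem.List.insertBy (fun a b => decide (pvKey b < pvKey a)) x (y :: ys) = x :: y :: ys := by
        simp [PySem.List.insertBy, hxy]
      rw [this]
      by_cases hx : pvP word x = true
      · -- every match in y :: ys has key ≤ key y < key x, so stepR picks x
        rw [List.find?_cons_of_pos hx]
        cases hf : (y :: ys).find? (pvP word) with
        | none => simp [pvStepR, hx, hf]
        | some m =>
          have hm : m ∈ y :: ys := List.mem_of_find?_eq_some hf
          have hkm : pvKey m ≤ pvKey y := by
            rcases List.mem_cons.mp hm with rfl | hm'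
            · exact le_refl _
            · exact hy m hm'
          have : pvKey m < pvKey x := lt_of_le_of_lt hkm hxy
          simp [pvStepR, hx, hf, this]
      · rw [Bool.not_eq_true] at hx
        rw [List.find?_cons_of_neg (by simp [hx])]
        simp [pvStepR, hx]
    · -- x goes behind y
      have : PySem.List.insertBy (fun a b => decide (pvKey b < pvKey a)) x (y :: ys) =
          y :: PySem.List.insertBy (fun a b => decide (pvKey b < pvKey a)) x ys := by
        simp [PySem.List.insertBy, hxy]
      rw [this]
      by_cases hpy : pvP word y = true
      · rw [List.find?_cons_of_pos hpy, List.find?_cons_of_pos hpy]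
        have : ¬ pvKey y < pvKey x := hxy
        simp [pvStepR, this]
      · rw [Bool.not_eq_true] at hpy
        rw [List.find?_cons_of_neg (by simp [hpy]), List.find?_cons_of_neg (by simp [hpy])]
        exact ih hys
    
lemma pvInsert_pairwise (x : List (String × String)) :
    ∀ l : List (List (String × String)),
      l.Pairwise (fun a b => pvKey b ≤ pvKey a) →
      (PySem.List.insertBy (fun a b => decide (pvKey b < pvKey a)) x l).Pairwise (fun a b => pvKey b ≤ pvKey a) := by
  intro l
  induction l with
  | nil => intro _; simp [PySem.List.insertBy]
  | cons y ys ih =>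
    intro hpw
    have hy : ∀ b ∈ ys, pvKey b ≤ pvKey y := (List.pairwise_cons.mp hpw).1
    have hys : ys.Pairwise (fun a b => pvKey b ≤ pvKey a) := (List.pairwise_cons.mp hpw).2
    by_cases hxy : pvKey y < pvKey x
    · have he : PySem.List.insertBy (fun a b => decide (pvKey b < pvKey a)) x (y :: ys) = x :: y :: ys := by
        simp [PySem.List.insertBy, hxy]
      rw [he, List.pairwise_cons]
      constructor
      · intro b hb
        rcases List.mem_cons.mp hb with rfl | hb'
        · exact le_of_lt hxy
        · exact le_trans (hy b hb') (le_of_lt hxy)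
      · exact hpw
    · have he : PySem.List.insertBy (fun a b => decide (pvKey b < pvKey a)) x (y :: ys) =
          y :: PySem.List.insertBy (fun a b => decide (pvKey b < pvKey a)) x ys := by
        simp [PySem.List.insertBy, hxy]
      rw [he, List.pairwise_cons]
      constructor
      · intro b hb
        rcases (PySem.List.mem_insertBy _ _ _ _).mp hb with rfl | hb'
        · exact le_of_not_gt hxy
        · exact hy b hb'
      · exact ih hys

lemma pvFoldR_eq_find_sortedFold (word : String) (xs : List (List (String × String))) :
    ∀ l : List (List (String × String)),
      l.Pairwise (fun a b => pvKey b ≤ pvKey a) →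
      xs.foldl (pvStepR word) (l.find? (pvP word)) =
        (xs.foldl (fun acc x => PySem.List.insertBy (fun a b => decide (pvKey b < pvKey a)) x acc) l).find? (pvP word) := by
  induction xs with
  | nil => intro l _; rfl
  | cons x xs ih =>
    intro l hpw
    simp only [List.foldl_cons]
    rw [← pvInsert_find word x l hpw]
    exact ih _ (pvInsert_pairwise x l hpw)

lemma pvFoldR_eq_find_sorted (word : String) (rules : List (List (String × String))) :
    rules.foldl (pvStepR word) none =
      (PySem.List.sorted rules (fun r => PySem.Str.len ((PySem.Dict.mk r).getD "ends_with" "")) true).find? (pvP word) := by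
  have h := pvFoldR_eq_find_sortedFold word rules [] (by simp)
  simp only [List.find?] at h
  rw [h, PySem.List.sorted_rev_eq_foldl_insertBy rules (fun r => PySem.Str.len ((PySem.Dict.mk r).getD "ends_with" ""))]
  rfl

-- ===== VERDICT (by name: the statement is the Claim_ definition above) =====
theorem apply_suffix_rules_py_spec : Claim_equal_apply_suffix_rules_py := by
  intro word rules _
  unfold Spec_apply_suffix_rules_py apply_suffix_rules_py apply_suffix_rules_py_alt
  have hB : rules.foldl (pvBstep word) none =
      (rules.foldl (pvStepR word) none).map pvG := by
    have := pvFoldB_eq_foldR word rules (acc := none)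
    simpa using this
  rw [hB, pvFoldR_eq_find_sorted word rules, pvAloop_eq_find]
  cases hf : (PySem.List.sorted rules (fun r => PySem.Str.len ((PySem.Dict.mk r).getD "ends_with" "")) true).find? (pvP word) with
  | none => rfl
  | some r => simp [pvG, pvKey]
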